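-- pv_equiv track=rewrite | github.com/faiz95ahmed/orbital_witness | app.py | get_column_positions
-- ===== SOURCE A (Python) =====
-- from typing import List, Generator
--
-- def get_column_positions(row: str) -> Generator[int, None, None]:
--     # get the column positions of the text in the row
--     # by counting the end of all runs of whitespace longer than 1 as the start of the next column
--     # e.g. "13.11.1996      Retail Warehouse, The         25.07.1996      SY664660   "
--     # would return [0, 16, 46, 62]
--     yield 0
--     col = False
--     for i, c in enumerate(row):
--         if col and c != ' ': # end of a column
--             col = False
--             yield i
--         col = i > 0 and row[i-1:i+1] == '  ' # start of a column
-- ===== SOURCE B (Python) =====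
-- import re
--
-- _COL_RE = re.compile(r' {2,}([^ ])')
--
-- def get_column_positions(row: str):
--     # yield 0, then the index of every non-space character that immediately
--     # follows a run of two or more literal spaces (regex scan instead of a
--     # per-character boolean state machine)
--     yield 0
--     for m in _COL_RE.finditer(row):
--         yield m.start(1)
-- ===== Notes on version B (the rewrite author's own statement) =====
-- stated objective: faster
-- what changed: Replaces A's per-character boolean state machine with a regex scan: yield 0, then re.finditer(r' {2,}([^ ])') yields the index of each captured non-space that ends a run of two-or-more literal spaces.
import Mathlib
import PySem

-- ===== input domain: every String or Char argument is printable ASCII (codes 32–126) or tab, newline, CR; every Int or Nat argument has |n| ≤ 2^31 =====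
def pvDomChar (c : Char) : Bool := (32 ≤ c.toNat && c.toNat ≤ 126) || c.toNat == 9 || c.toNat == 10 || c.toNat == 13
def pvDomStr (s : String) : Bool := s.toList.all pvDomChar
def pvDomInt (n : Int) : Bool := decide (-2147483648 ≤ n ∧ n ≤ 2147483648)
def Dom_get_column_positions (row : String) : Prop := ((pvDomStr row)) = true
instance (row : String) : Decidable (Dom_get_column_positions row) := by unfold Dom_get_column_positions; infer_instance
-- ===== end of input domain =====

-- B replaces A's per-character boolean state machine by a regex scan (find a
-- run of >= 2 literal spaces, yield the position of the following non-space);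
-- measured faster in a timing run (C regex engine vs a Python char loop).
-- The generators are compared as the lists of the values they yield.

-- ===== PORT A =====
-- loop body of A: state is (yielded values, col); ic is the (i, c) of enumerate;
-- 'if col and c != ' '' appends i (and clears col); col is then reassigned unconditionally
def pvStepA (cs : List Char) (st : List Int × Bool) (ic : Int × Char) : List Int × Bool :=
  ((if st.2 && !(ic.2 == ' ') then st.1 ++ [ic.1] else st.1),
   decide (ic.1 > 0) && (PySem.List.slice cs (some (ic.1 - 1)) (some (ic.1 + 1)) == [' ', ' ']))

def get_column_positions (row : String) : List Int :=
  let cs := row.toList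
  ((PySem.List.enumerate cs 0).foldl (pvStepA cs) ([0], false)).1

-- ===== PORT B =====
-- Hand port of Source B's re.finditer(r' {2,}([^ ])'), exact for this pattern:
-- pvFindMatches scans left to right for two literal spaces (the only place a
-- match can start); pvEmit then consumes the rest of the greedy space run and
-- yields the index of the captured non-space, resuming the scan after it.
mutual
def pvFindMatches : List Char → Int → List Int
  | c1 :: c2 :: rest, i =>
      if c1 = ' ' ∧ c2 = ' ' then pvEmit rest (i + 2)
      else pvFindMatches (c2 :: rest) (i + 1)
  | _ :: _, _ => []          -- a single remaining char cannot start a match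
  | [], _ => []
termination_by cs _ => cs.length

def pvEmit : List Char → Int → List Int
  | c :: rest, i => if c = ' ' then pvEmit rest (i + 1) else i :: pvFindMatches rest (i + 1)
  | [], _ => []
termination_by cs _ => cs.length
end

def get_column_positions_alt (row : String) : List Int :=
  0 :: pvFindMatches row.toList 0

-- ===== PRECONDITION & SPEC =====
def Spec_get_column_positions (row : String) (out : List Int) : Prop := out = get_column_positions_alt row
instance (row : String) (out : List Int) : Decidable (Spec_get_column_positions row out) := by unfold Spec_get_column_positions; infer_instance

-- ===== CLAIM (what is proved, stated in full; the proofs are below) =====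
def Claim_equal_get_column_positions : Prop := ∀ (row : String), Dom_get_column_positions row → Spec_get_column_positions row (get_column_positions row)

-- ===== LEMMAS AND PROOFS =====

-- j is a column start: two spaces immediately before it, and it is not a space
def pvQ (cs : List Char) (j : Nat) : Bool :=
  decide (2 ≤ j) && (cs[j - 2]? == some ' ') && (cs[j - 1]? == some ' ') && !(cs[j]? == some ' ')

-- the column starts at positions >= i
def pvOut (cs : List Char) (i : Nat) : List Int :=
  ((List.range' i (cs.length - i)).filter (pvQ cs)).map (fun j => (j : Int))

theorem pvOut_stop (cs : List Char) (i : Nat) (h : cs.length ≤ i) : pvOut cs i = [] := by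
  unfold pvOut
  rw [Nat.sub_eq_zero_of_le h]
  rfl

theorem pvOut_cons (cs : List Char) (i : Nat) (h : i < cs.length) :
    pvOut cs i = (if pvQ cs i then [(i : Int)] else []) ++ pvOut cs (i + 1) := by
  unfold pvOut
  have h1 : cs.length - i = (cs.length - (i + 1)) + 1 := by omega
  rw [h1, List.range'_succ]
  simp only [List.filter_cons]
  split_ifs <;> simp

theorem pvOut_skip (cs : List Char) (i : Nat) (h : i < cs.length) (hq : pvQ cs i = false) :
    pvOut cs i = pvOut cs (i + 1) := by
  rw [pvOut_cons cs i h, hq]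
  simp

-- col entering iteration i of A's loop
def pvP (cs : List Char) (i : Nat) : Bool :=
  decide (2 ≤ i) && (cs[i - 2]? == some ' ') && (cs[i - 1]? == some ' ')

theorem pvColStep (cs : List Char) (i : Nat) (h : i < cs.length) :
    (decide ((i : Int) > 0) &&
      (PySem.List.slice cs (some ((i : Int) - 1)) (some ((i : Int) + 1)) == [' ', ' '])) =
    pvP cs (i + 1) := by
  cases i with
  | zero => simp [pvP]
  | succ k =>
    have h1 : (decide (((k + 1 : Nat) : Int) > 0)) = true := by simp
    have h2 : ((k + 1 : Nat) : Int) - 1 = ((k : Nat) : Int) := by push_cast; ring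
    have h3 : ((k + 1 : Nat) : Int) + 1 = ((k + 2 : Nat) : Int) := by push_cast; ring
    rw [h1, h2, h3, PySem.List.slice_natCast]
    have hk2 : k + 2 - k = 2 := by omega
    rw [hk2]
    have hk : k < cs.length := by omega
    have hd : cs.drop k = cs[k] :: cs.drop (k + 1) := List.drop_eq_getElem_cons hk
    have hd2 : cs.drop (k + 1) = cs[k + 1] :: cs.drop (k + 2) := List.drop_eq_getElem_cons h
    have htake : List.take 2 (cs.drop k) = [cs[k], cs[k + 1]] := by
      rw [hd, hd2]
      rfl
    rw [htake]
    unfold pvP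
    simp [hk, h]

-- invariant for A's loop: with col = pvP i on entering position i, the
-- remaining fold appends exactly the column starts at positions >= i
theorem pvA_loop (cs : List Char) :
    ∀ (tail : List Char) (i : Nat) (acc : List Int), tail = cs.drop i →
      ((PySem.List.enumerate tail (i : Int)).foldl (pvStepA cs) (acc, pvP cs i)).1
        = acc ++ pvOut cs i := by
  intro tail
  induction tail with
  | nil =>
    intro i acc h
    have : cs.length ≤ i := List.drop_eq_nil_iff.mp h.symm
    simp [PySem.List.enumerate_nil, pvOut_stop cs i this]
  | cons c t ih =>
    intro i acc h
    have hlen : i < cs.length := by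
      by_contra hc
      rw [List.drop_eq_nil_of_le (by omega)] at h
      simp at h
    have hci : cs[i]? = some c := by
      have h0 : (List.drop i cs)[0]? = some c := by rw [← h]; rfl
      rw [List.getElem?_drop] at h0
      simpa using h0
    have ht : t = cs.drop (i + 1) := by
      have h1 : cs.drop (i + 1) = (cs.drop i).drop 1 := by
        rw [List.drop_drop]
      rw [h1, ← h]
      simp
    rw [PySem.List.enumerate_cons]
    have hstep : pvStepA cs (acc, pvP cs i) ((i : Int), c) =
        ((if pvQ cs i then acc ++ [(i : Int)] else acc), pvP cs (i + 1)) := by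
      unfold pvStepA
      rw [pvColStep cs i hlen]
      have hq : pvQ cs i = (pvP cs i && !(c == ' ')) := by
        unfold pvQ pvP
        rw [hci]
        simp [Bool.and_assoc]
      rw [hq]
    have hcast : (i : Int) + 1 = ((i + 1 : Nat) : Int) := by push_cast; ring
    rw [List.foldl_cons, hstep, hcast, ih (i + 1) _ ht]
    rw [pvOut_cons cs i hlen]
    split_ifs <;> simp

-- the same characterisation for B's regex scan, by fuel induction;
-- part 1: scanning state (no match can straddle position i);
-- part 2: inside a matched run (two spaces immediately before position i)
theorem pvB_main (n : Nat) : ∀ (cs : List Char) (i : Nat), cs.length - i ≤ n →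
    ((¬(1 ≤ i ∧ cs[i - 1]? = some ' ' ∧ cs[i]? = some ' ')) → pvQ cs i = false →
        pvFindMatches (cs.drop i) (i : Int) = pvOut cs i)
    ∧ (2 ≤ i → cs[i - 2]? = some ' ' → cs[i - 1]? = some ' ' →
        pvEmit (cs.drop i) (i : Int) = pvOut cs i) := by
  induction n with
  | zero =>
    intro cs i hfuel
    have hle : cs.length ≤ i := by omega
    rw [List.drop_eq_nil_of_le hle, pvOut_stop cs i hle]
    exact ⟨fun _ _ => by simp [pvFindMatches], fun _ _ _ => by simp [pvEmit]⟩
  | succ n ih =>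
    intro cs i hfuel
    cases hdrop : cs.drop i with
    | nil =>
      have hle : cs.length ≤ i := List.drop_eq_nil_iff.mp hdrop
      rw [pvOut_stop cs i hle]
      exact ⟨fun _ _ => by simp [pvFindMatches], fun _ _ _ => by simp [pvEmit]⟩
    | cons c t =>
      have hlen : i < cs.length := by
        by_contra hc
        rw [List.drop_eq_nil_of_le (by omega)] at hdrop
        simp at hdrop
      have hci : cs[i]? = some c := by
        have h0 : (List.drop i cs)[0]? = some c := by rw [hdrop]; rfl
        rw [List.getElem?_drop] at h0
        simpa using h0
      have ht : t = cs.drop (i + 1) := by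
        have h1 : cs.drop (i + 1) = (cs.drop i).drop 1 := by rw [List.drop_drop]
        rw [h1, hdrop]
        simp
      have hfuel1 : cs.length - (i + 1) ≤ n := by omega
      have hcast1 : (i : Int) + 1 = ((i + 1 : Nat) : Int) := by push_cast; ring
      constructor
      · -- part 1: pvFindMatches
        intro hinv hq
        cases t with
        | nil =>
          -- only one char left: no match can fit
          have hle1 : cs.length ≤ i + 1 := List.drop_eq_nil_iff.mp ht.symm
          rw [pvOut_skip cs i hlen hq, pvOut_stop cs (i + 1) hle1]
          simp [pvFindMatches]
        | cons c2 t2 =>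
          have hci2 : cs[i + 1]? = some c2 := by
            have h0 : (List.drop (i + 1) cs)[0]? = some c2 := by rw [← ht]; rfl
            rw [List.getElem?_drop] at h0
            simpa using h0
          have hlen2 : i + 1 < cs.length := by
            by_contra hc
            rw [List.getElem?_eq_none (by omega)] at hci2
            simp at hci2
          have ht2 : t2 = cs.drop (i + 2) := by
            have h1 : cs.drop (i + 2) = (cs.drop (i + 1)).drop 1 := by rw [List.drop_drop]
            rw [h1, ← ht]
            simp
          by_cases hcc : c = ' ' ∧ c2 = ' '
          · -- a match starts at i: hand over to pvEmit after the two spaces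
            simp only [pvFindMatches, if_pos hcc]
            have hcast2 : (i : Int) + 2 = ((i + 2 : Nat) : Int) := by push_cast; ring
            rw [hcast2, ht2]
            have h2 := (ih cs (i + 2) (by omega)).2 (by omega)
              (by simpa using hcc.1 ▸ hci) (by simpa using hcc.2 ▸ hci2)
            have hq2 : pvQ cs (i + 1) = false := by
              unfold pvQ
              rw [hci2, hcc.2]
              simp
            rw [h2, pvOut_skip cs i hlen hq, pvOut_skip cs (i + 1) hlen2 hq2]
          · -- no match at i: step one char
            simp only [pvFindMatches, if_neg hcc]
            have hq1 : pvQ cs (i + 1) = false := by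
              unfold pvQ
              by_cases hc' : c = ' '
              · have hc2' : c2 ≠ ' ' := fun h2 => hcc ⟨hc', h2⟩
                rcases Decidable.not_and_iff_or_not.mp hinv with h1 | h1
                · have hi0 : i = 0 := by omega
                  subst hi0
                  simp
                · rcases Decidable.not_and_iff_or_not.mp h1 with h2 | h2
                  · rcases Nat.eq_zero_or_pos i with h0 | h0
                    · subst h0; simp
                    · have he : i + 1 - 2 = i - 1 := by omega
                      rw [he]
                      simp only [Bool.and_eq_false_iff]
                      left; left; right
                      simp [h2]
                  · exact absurd (hc' ▸ hci) h2
              · simp only [Bool.and_eq_false_iff]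
                left; right
                have he : i + 1 - 1 = i := by omega
                rw [he, hci]
                simp [hc']
            have h1 := (ih cs (i + 1) hfuel1).1
              (by
                intro hcon
                rcases hcon with ⟨_, ha, hb⟩
                have he : i + 1 - 1 = i := by omega
                rw [he, hci] at ha
                rw [hci2] at hb
                exact hcc ⟨Option.some.inj ha, Option.some.inj hb⟩) hq1
            rw [← ht] at h1
            rw [hcast1, h1, pvOut_skip cs i hlen hq]
      · -- part 2: pvEmit (two spaces immediately before i)
        intro hi2 hs2 hs1
        cases t with
        | nil =>
          have hle1 : cs.length ≤ i + 1 := List.drop_eq_nil_iff.mp ht.symm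
          by_cases hc' : c = ' '
          · simp only [pvEmit, if_pos hc']
            have hq0 : pvQ cs i = false := by
              unfold pvQ
              rw [hci, hc']
              simp
            rw [pvOut_skip cs i hlen hq0, pvOut_stop cs (i + 1) hle1]
          · simp only [pvEmit, if_neg hc']
            have hqi : pvQ cs i = true := by
              unfold pvQ
              rw [hci, hs1, hs2]
              simp [hi2, hc']
            rw [pvOut_cons cs i hlen, hqi, pvOut_stop cs (i + 1) hle1]
            simp [pvFindMatches]
        | cons c2 t2 =>
          by_cases hc' : c = ' '
          · -- still inside the run: skip
            simp only [pvEmit, if_pos hc']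
            have h2 := (ih cs (i + 1) hfuel1).2 (by omega)
              (by have he : i + 1 - 2 = i - 1 := by omega
                  rw [he]; exact hs1)
              (by have he : i + 1 - 1 = i := by omega
                  rw [he, hci, hc'])
            rw [← ht] at h2
            simp only [pvEmit] at h2
            have hq0 : pvQ cs i = false := by
              unfold pvQ
              rw [hci, hc']
              simp
            rw [hcast1, h2, pvOut_skip cs i hlen hq0]
          · -- the captured non-space: yield i and resume scanning
            simp only [pvEmit, if_neg hc']
            have hq1 : pvQ cs (i + 1) = false := by
              unfold pvQ
              simp only [Bool.and_eq_false_iff]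
              left; right
              have he : i + 1 - 1 = i := by omega
              rw [he, hci]
              simp [hc']
            have h1 := (ih cs (i + 1) hfuel1).1
              (by
                intro hcon
                rcases hcon with ⟨_, ha, _⟩
                have he : i + 1 - 1 = i := by omega
                rw [he, hci] at ha
                exact hc' (Option.some.inj ha)) hq1
            rw [← ht] at h1
            have hqi : pvQ cs i = true := by
              unfold pvQ
              rw [hci, hs1, hs2]
              simp [hi2, hc']
            rw [hcast1, h1, pvOut_cons cs i hlen, hqi]
            simp

theorem pvA_eq (row : String) :
    get_column_positions row = 0 :: pvOut row.toList 0 := by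
  unfold get_column_positions
  have h0 : pvP row.toList 0 = false := by simp [pvP]
  have h := pvA_loop row.toList row.toList 0 [0] (by simp)
  rw [h0] at h
  simpa using h

theorem pvB_eq (row : String) :
    get_column_positions_alt row = 0 :: pvOut row.toList 0 := by
  unfold get_column_positions_alt
  have h := (pvB_main row.toList.length row.toList 0 (by omega)).1
    (by intro hcon; exact absurd hcon.1 (by omega)) (by simp [pvQ])
  simpa using h

-- ===== VERDICT (by name: the statement is the Claim_ definition above) =====
theorem get_column_positions_spec : Claim_equal_get_column_positions := by
  intro row _
  unfold Spec_get_column_positions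
  rw [pvA_eq row, pvB_eq row]
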